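-- pv_equiv track=rewrite | github.com/ArnePannemans/semantic_document_chunker | src/core/predictor.py | split_by_indices
-- ===== SOURCE A (Python) =====
-- def split_by_indices(sentences: list[str], indices: list[int]) -> list[str]:
--     """
--     Split sentences into chunks based on split indices.
--
--     Args:
--         sentences: List of sentences
--         indices: Indices where splits should occur
--
--     Returns:
--         List of text chunks
--     """
--     if not indices:
--         return [" ".join(sentences)]
--
--     chunks = []
--     start = 0
--
--     for idx in sorted(indices):
--         if 0 < idx <= len(sentences):
--             chunk = " ".join(sentences[start:idx])
--             if chunk:
--                 chunks.append(chunk)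
--             start = idx
--
--     # Add remaining sentences
--     if start < len(sentences):
--         chunk = " ".join(sentences[start:])
--         if chunk:
--             chunks.append(chunk)
--
--     return chunks
-- ===== SOURCE B (Python) =====
-- def split_by_indices(sentences: list[str], indices: list[int]) -> list[str]:
--     """Single pass over the sentences with a cut-position set (no sorting, no slicing)."""
--     if not indices:
--         return [" ".join(sentences)]
--
--     n = len(sentences)
--     cuts = {i for i in indices if 0 < i <= n}
--
--     chunks = []
--     cur = []
--     for pos, sentence in enumerate(sentences):
--         if pos in cuts:
--             chunk = " ".join(cur)
--             if chunk:
--                 chunks.append(chunk)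
--             cur = [sentence]
--         else:
--             cur.append(sentence)
--
--     chunk = " ".join(cur)
--     if chunk:
--         chunks.append(chunk)
--     return chunks
-- ===== Notes on version B (the rewrite author's own statement) =====
-- stated objective: faster
-- what changed: Replaces A's sort-the-indices pointer loop (sort, then a slice+join of the sentence list per valid index) by a single left-to-right pass over the sentences that flushes the running chunk at positions found in a precomputed cut set, so no sorting and no per-cut slicing of the original list is performed.
import Mathlib
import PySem

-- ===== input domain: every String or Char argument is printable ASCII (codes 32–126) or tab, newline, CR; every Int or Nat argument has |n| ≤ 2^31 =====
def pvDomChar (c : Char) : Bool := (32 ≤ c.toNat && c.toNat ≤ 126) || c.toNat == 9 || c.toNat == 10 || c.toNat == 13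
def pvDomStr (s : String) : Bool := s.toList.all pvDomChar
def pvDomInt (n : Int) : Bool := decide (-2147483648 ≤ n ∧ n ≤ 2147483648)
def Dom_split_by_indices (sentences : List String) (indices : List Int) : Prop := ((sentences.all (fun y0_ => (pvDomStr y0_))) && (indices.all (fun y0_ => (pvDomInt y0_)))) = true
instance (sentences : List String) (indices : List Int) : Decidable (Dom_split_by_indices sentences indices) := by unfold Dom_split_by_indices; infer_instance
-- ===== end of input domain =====

-- B replaces A's sort-the-indices pointer loop (sort, then slice+join per valid index) by a
-- single left-to-right pass over the sentences that flushes the running chunk at positions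
-- found in a precomputed cut set; same return value on every input (both are total).

-- shared helper: Python's `if chunk: chunks.append(chunk)` (both sources contain this line)
def pvPush (chunks : List String) (chunk : String) : List String :=
  if chunk ≠ "" then chunks ++ [chunk] else chunks

-- ===== PORT A =====
-- loop body of `for idx in sorted(indices): if 0 < idx <= len(sentences): …`
def pvA_step (xs : List String) (st : List String × Int) (idx : Int) : List String × Int :=
  if 0 < idx ∧ idx ≤ (xs.length : Int) then
    (pvPush st.1 (PySem.Str.join " " (PySem.List.slice xs (some st.2) (some idx))), idx)
  else st

def split_by_indices (sentences : List String) (indices : List Int) : List String :=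
  if indices = [] then [PySem.Str.join " " sentences] else
  let st := (PySem.List.sorted indices (fun x => x) false).foldl (pvA_step sentences) ([], 0)
  if st.2 < (sentences.length : Int) then
    pvPush st.1 (PySem.Str.join " " (PySem.List.slice sentences (some st.2) none))
  else st.1

-- ===== PORT B =====
-- loop body of `for pos, sentence in enumerate(sentences): …` (flush at cut positions)
def pvB_step (cuts : PySem.Set Int) (st : List String × List String) (p : Int × String) :
    List String × List String :=
  if PySem.Set.contains cuts p.1 then (pvPush st.1 (PySem.Str.join " " st.2), [p.2])
  else (st.1, st.2 ++ [p.2])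

def split_by_indices_alt (sentences : List String) (indices : List Int) : List String :=
  if indices = [] then [PySem.Str.join " " sentences] else
  let cuts : PySem.Set Int :=
    PySem.Set.ofList (indices.filter (fun i => decide (0 < i ∧ i ≤ (sentences.length : Int))))
  let st := (PySem.List.enumerate sentences 0).foldl (pvB_step cuts) ([], [])
  pvPush st.1 (PySem.Str.join " " st.2)

-- ===== PRECONDITION & SPEC =====
def Spec_split_by_indices (sentences : List String) (indices : List Int) (out : List String) : Prop := out = split_by_indices_alt sentences indices
instance (sentences : List String) (indices : List Int) (out : List String) : Decidable (Spec_split_by_indices sentences indices out) := by unfold Spec_split_by_indices; infer_instance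

-- ===== CLAIM (what is proved, stated in full; the proofs are below) =====
def Claim_equal_split_by_indices : Prop := ∀ (sentences : List String) (indices : List Int), Dom_split_by_indices sentences indices → Spec_split_by_indices sentences indices (split_by_indices sentences indices)

-- ===== LEMMAS AND PROOFS =====

-- a chunk as a singleton-or-empty list
def pvEmitS (c : String) : List String := if c ≠ "" then [c] else []

lemma pvPush_eq (acc : List String) (c : String) : pvPush acc c = acc ++ pvEmitS c := by
  unfold pvPush pvEmitS; split_ifs <;> simp

-- emitted chunk of a list of sentences
def pvEmit (l : List String) : List String := pvEmitS (PySem.Str.join " " l)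

lemma pvEmit_nil : pvEmit [] = [] := by decide

-- the segment sentences[a:b] (natural bounds)
def pvSeg (xs : List String) (a b : Nat) : List String := (xs.drop a).take (b - a)

lemma pvSeg_self (xs : List String) (a : Nat) : pvSeg xs a a = [] := by
  simp [pvSeg]

lemma pvSeg_append (xs : List String) (m p c : Nat) (hmp : m ≤ p) (hpc : p ≤ c) :
    pvSeg xs m p ++ pvSeg xs p c = pvSeg xs m c := by
  unfold pvSeg
  have hd : xs.drop p = (xs.drop m).drop (p - m) := by rw [List.drop_drop]; congr 1; omega
  have h1 : c - m = (p - m) + (c - p) := by omega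
  rw [h1, List.take_add, ← hd]

lemma pvSeg_drop (xs : List String) (m p : Nat) (hmp : m ≤ p) :
    pvSeg xs m p ++ xs.drop p = xs.drop m := by
  unfold pvSeg
  have hd : xs.drop p = (xs.drop m).drop (p - m) := by rw [List.drop_drop]; congr 1; omega
  rw [hd, List.take_append_drop]

-- the chunks produced by cutting xs at the positions of the cut list, starting at s
def pvSegs (xs : List String) : Nat → List Nat → List String
  | s, [] => pvEmit (xs.drop s)
  | s, c :: cs => pvEmit (pvSeg xs s c) ++ pvSegs xs c cs

-- remove adjacent duplicates
def pvDd : List Nat → List Nat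
  | [] => []
  | [a] => [a]
  | a :: b :: t => if a = b then pvDd (b :: t) else a :: pvDd (b :: t)

lemma pvMem_dd (x : Nat) : ∀ (l : List Nat), x ∈ pvDd l ↔ x ∈ l
  | [] => by simp [pvDd]
  | [a] => by simp [pvDd]
  | a :: b :: t => by
    unfold pvDd
    split_ifs with h
    · rw [pvMem_dd x (b :: t)]
      subst h; simp
    · simp [pvMem_dd x (b :: t)]

lemma pvDd_pairwise : ∀ (l : List Nat), l.Pairwise (· ≤ ·) → (pvDd l).Pairwise (· < ·)
  | [] => by simp [pvDd]
  | [a] => by simp [pvDd]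
  | a :: b :: t => by
    intro h
    have hbt : (b :: t).Pairwise (· ≤ ·) := h.tail
    have hab : ∀ y ∈ b :: t, a ≤ y := by
      intro y hy; exact (List.pairwise_cons.mp h).1 y hy
    unfold pvDd
    split_ifs with hEq
    · exact pvDd_pairwise (b :: t) hbt
    · refine List.pairwise_cons.mpr ⟨?_, pvDd_pairwise (b :: t) hbt⟩
      intro y hy
      have hy' : y ∈ b :: t := (pvMem_dd y (b :: t)).mp hy
      have hby : b ≤ y := by
        rcases hy' with _ | hy'
        · exact le_refl _
        · exact (List.pairwise_cons.mp hbt).1 y (by assumption)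
      have : a ≤ b := hab b (by simp)
      omega

lemma pvSegs_dd (xs : List String) : ∀ (l : List Nat) (s : Nat),
    pvSegs xs s (pvDd l) = pvSegs xs s l
  | [], s => rfl
  | [a], s => rfl
  | a :: b :: t, s => by
    unfold pvDd
    split_ifs with h
    · subst h
      show pvSegs xs s (pvDd (a :: t)) = pvSegs xs s (a :: a :: t)
      rw [pvSegs_dd xs (a :: t) s]
      show pvSegs xs s (a :: t) = pvEmit (pvSeg xs s a) ++ (pvEmit (pvSeg xs a a) ++ pvSegs xs a t)
      rw [pvSeg_self, pvEmit_nil]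
      rfl
    · show pvEmit (pvSeg xs s a) ++ pvSegs xs a (pvDd (b :: t))
          = pvEmit (pvSeg xs s a) ++ pvSegs xs a (b :: t)
      rw [pvSegs_dd xs (b :: t) a]

-- ===== A-side characterization =====

-- the unconditional loop body (after filtering the valid indices out of the sorted list)
def pvA_step' (xs : List String) (st : List String × Int) (idx : Int) : List String × Int :=
  (pvPush st.1 (PySem.Str.join " " (PySem.List.slice xs (some st.2) (some idx))), idx)

-- the tail of A: "add remaining sentences"
def pvA_fin (xs : List String) (st : List String × Int) : List String :=
  if st.2 < (xs.length : Int) then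
    pvPush st.1 (PySem.Str.join " " (PySem.List.slice xs (some st.2) none))
  else st.1

lemma pvA_loop (xs : List String) : ∀ (L : List Int) (acc : List String) (s : Int),
    0 ≤ s → s ≤ (xs.length : Int) →
    (∀ i ∈ L, s ≤ i ∧ i ≤ (xs.length : Int)) → L.Pairwise (· ≤ ·) →
    pvA_fin xs (L.foldl (pvA_step' xs) (acc, s)) =
      acc ++ pvSegs xs s.toNat (L.map Int.toNat) := by
  intro L
  induction L with
  | nil =>
    intro acc s hs0 hsn _ _
    simp only [List.foldl_nil, List.map_nil, pvSegs]
    unfold pvA_fin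
    split_ifs with hlt
    · rw [PySem.List.slice_from xs hs0, pvPush_eq]
      rfl
    · have hseq : s = (xs.length : Int) := by omega
      have : xs.drop s.toNat = [] := by
        rw [hseq]; simp
      rw [this]
      have : PySem.Str.join " " ([] : List String) = "" := by decide
      simp [pvEmit, pvEmitS, this]
  | cons c L ih =>
    intro acc s hs0 hsn hall hpw
    have hc := hall c (by simp)
    have hsc : s ≤ c := hc.1
    have hcn : c ≤ (xs.length : Int) := hc.2
    simp only [List.foldl_cons, List.map_cons, pvSegs]
    have hstep : pvA_step' xs (acc, s) c =
        (pvPush acc (PySem.Str.join " " (pvSeg xs s.toNat c.toNat)), c) := by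
      unfold pvA_step'
      rw [PySem.List.slice_of_nonneg xs hs0 (by omega) hsn hcn]
      rfl
    rw [hstep, ih _ c (by omega) hcn
      (fun i hi => ⟨(List.pairwise_cons.mp hpw).1 i hi, (hall i (by simp [hi])).2⟩) hpw.tail]
    rw [pvPush_eq, List.append_assoc]
    rfl

-- ===== B-side characterization =====

lemma pvB_noflush (S : PySem.Set Int) : ∀ (l : List String) (p : Int) (out cur : List String),
    (∀ k : Nat, k < l.length → (p + (k : Int)) ∉ S) →
    (PySem.List.enumerate l p).foldl (pvB_step S) (out, cur) = (out, cur ++ l) := by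
  intro l
  induction l with
  | nil => intro p out cur _; simp [PySem.List.enumerate_nil]
  | cons x l ih =>
    intro p out cur h
    rw [PySem.List.enumerate_cons, List.foldl_cons]
    have hp : p ∉ S := by
      have := h 0 (by simp)
      simpa using this
    have hstep : pvB_step S (out, cur) (p, x) = (out, cur ++ [x]) := by
      unfold pvB_step
      rw [if_neg (fun hc => hp ((PySem.Set.contains_iff S p).mp hc))]
    rw [hstep, ih (p + 1) out (cur ++ [x]) (fun k hk => by
      have := h (k + 1) (by simpa using Nat.succ_lt_succ hk)
      push_cast at this ⊢
      have heq : p + 1 + (k : Int) = p + ((k : Int) + 1) := by ring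
      rw [heq]; exact this)]
    simp

lemma pvB_loop (xs : List String) (S : PySem.Set Int) :
    ∀ (C : List Nat) (p m : Nat) (out : List String),
    m ≤ p → p ≤ xs.length → C.Pairwise (· < ·) →
    (∀ c ∈ C, p ≤ c ∧ c ≤ xs.length) →
    (∀ q : Nat, p ≤ q → q < xs.length → ((q : Int) ∈ S ↔ q ∈ C)) →
    (fun st => pvPush st.1 (PySem.Str.join " " st.2))
      ((PySem.List.enumerate (xs.drop p) (p : Int)).foldl (pvB_step S) (out, pvSeg xs m p))
      = out ++ pvSegs xs m C := by
  intro C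
  induction C with
  | nil =>
    intro p m out hmp hpn _ _ hq
    rw [pvB_noflush S (xs.drop p) (p : Int) out (pvSeg xs m p) (fun k hk => by
      have hk' : p + k < xs.length := by
        have := hk; rw [List.length_drop] at this; omega
      have := hq (p + k) (by omega) hk'
      push_cast at this ⊢
      intro hmem
      have h2 := this.mp (by exact_mod_cast hmem)
      simp at h2)]
    rw [pvSeg_drop xs m p hmp]
    simp only [pvSegs]
    exact pvPush_eq out _
  | cons c cs ih =>
    intro p m out hmp hpn hpw hall hq
    have hc := hall c (by simp)
    by_cases hcl : c < xs.length
    · -- the cut c falls inside the list: flush there and recurse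
      have hsplit : xs.drop p = pvSeg xs p c ++ xs.drop c := (pvSeg_drop xs p c hc.1).symm
      have hlen : (pvSeg xs p c).length = c - p := by
        unfold pvSeg
        rw [List.length_take, List.length_drop]
        omega
      rw [hsplit, PySem.List.enumerate_append, List.foldl_append]
      rw [pvB_noflush S (pvSeg xs p c) (p : Int) out (pvSeg xs m p) (fun k hk => by
        rw [hlen] at hk
        have hqc : p + k < c := by omega
        have := hq (p + k) (by omega) (by omega)
        push_cast at this ⊢
        intro hmem
        have : (p + k : Nat) ∈ c :: cs := this.mp (by exact_mod_cast hmem)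
        rcases this with _ | hmem'
        · omega
        · have : c < p + k := by
            have := (List.pairwise_cons.mp hpw).1 _ (by assumption)
            omega
          omega)]
      rw [pvSeg_append xs m p c hmp hc.1, hlen]
      have hcast : (p : Int) + ((c - p : Nat) : Int) = (c : Int) := by
        have : ((c - p : Nat) : Int) = (c : Int) - (p : Int) := by
          push_cast [Nat.cast_sub hc.1]; ring
        rw [this]; ring
      rw [hcast]
      rw [List.drop_eq_getElem_cons hcl, PySem.List.enumerate_cons, List.foldl_cons]
      have hcS : (c : Int) ∈ S := (hq c hc.1 hcl).mpr (by simp)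
      have hstep : pvB_step S (out, pvSeg xs m c) ((c : Int), xs[c]) =
          (pvPush out (PySem.Str.join " " (pvSeg xs m c)), [xs[c]]) := by
        unfold pvB_step
        rw [if_pos ((PySem.Set.contains_iff S (c : Int)).mpr hcS)]
      rw [hstep]
      have hsing : pvSeg xs c (c + 1) = [xs[c]] := by
        have h1 : c + 1 - c = 1 := by omega
        unfold pvSeg
        rw [h1, List.drop_eq_getElem_cons hcl, List.take_succ_cons, List.take_zero]
      rw [← hsing]
      have hc1 : ((c : Int) + 1) = (((c + 1 : Nat)) : Int) := by push_cast; ring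
      rw [hc1]
      rw [ih (c + 1) c (pvPush out (PySem.Str.join " " (pvSeg xs m c)))
        (by omega) (by omega) hpw.tail
        (fun c' hc' => ⟨by have := (List.pairwise_cons.mp hpw).1 c' hc'; omega,
                        (hall c' (by simp [hc'])).2⟩)
        (fun q hq1 hq2 => by
          rw [hq q (by omega) hq2]
          constructor
          · intro h; rcases h with _ | h; · omega
            · assumption
          · intro h; exact List.mem_cons_of_mem _ h)]
      rw [pvPush_eq, List.append_assoc]
      rfl
    · -- the cut c equals len(xs): no flush happens, and the tail cut list is empty
      have hceq : c = xs.length := by omega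
      have hcs : cs = [] := by
        cases cs with
        | nil => rfl
        | cons c' t =>
          have h1 := (List.pairwise_cons.mp hpw).1 c' (by simp)
          have h2 := (hall c' (by simp)).2
          omega
      subst hcs
      rw [pvB_noflush S (xs.drop p) (p : Int) out (pvSeg xs m p) (fun k hk => by
        have hk' : p + k < xs.length := by
          have := hk; rw [List.length_drop] at this; omega
        have := hq (p + k) (by omega) hk'
        push_cast at this ⊢
        intro hmem
        have : (p + k : Nat) ∈ [c] := this.mp (by exact_mod_cast hmem)
        simp at this
        omega)]
      rw [pvSeg_drop xs m p hmp]
      simp only [pvSegs]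
      rw [pvPush_eq]
      have h1 : pvSeg xs m c = xs.drop m := by
        unfold pvSeg
        apply List.take_of_length_le
        rw [List.length_drop]
        omega
      have h2 : xs.drop c = [] := by
        rw [hceq]; simp
      rw [h1, h2, pvEmit_nil]
      simp [pvEmit]

-- ===== VERDICT (by name: the statement is the Claim_ definition above) =====
-- B's cut set, as a list of Ints
def pvS (xs : List String) (indices : List Int) : PySem.Set Int :=
  PySem.Set.ofList (indices.filter (fun i => decide (0 < i ∧ i ≤ (xs.length : Int))))

-- A's valid cut list: the valid indices of the sorted index list
def pvL (xs : List String) (indices : List Int) : List Int :=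
  (PySem.List.sorted indices (fun x => x) false).filter
    (fun i => decide (0 < i ∧ i ≤ (xs.length : Int)))

lemma pvL_mem (xs : List String) (indices : List Int) (i : Int) :
    i ∈ pvL xs indices ↔ i ∈ indices ∧ 0 < i ∧ i ≤ (xs.length : Int) := by
  unfold pvL
  rw [List.mem_filter, PySem.List.mem_sorted]
  simp

lemma pvA_char (xs : List String) (indices : List Int) (hnil : indices ≠ []) :
    split_by_indices xs indices = pvSegs xs 0 ((pvL xs indices).map Int.toNat) := by
  unfold split_by_indices
  rw [if_neg hnil]
  show pvA_fin xs ((PySem.List.sorted indices (fun x => x) false).foldl (pvA_step xs) ([], 0)) = _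
  have hfun : pvA_step xs = (fun (st : List String × Int) idx =>
      if 0 < idx ∧ idx ≤ (xs.length : Int) then pvA_step' xs st idx else st) := rfl
  rw [hfun, PySem.List.foldl_ite_eq_foldl_filter
    (fun idx : Int => 0 < idx ∧ idx ≤ (xs.length : Int)) (pvA_step' xs)
    (PySem.List.sorted indices (fun x => x) false) (([], 0) : List String × Int)]
  have hpwL : (pvL xs indices).Pairwise (· ≤ ·) := by
    unfold pvL
    exact (PySem.List.sorted_pairwise indices (fun x => x)).filter _
  have := pvA_loop xs (pvL xs indices) [] 0 (le_refl 0) (by positivity)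
    (fun i hi => ⟨le_of_lt ((pvL_mem xs indices i).mp hi).2.1, ((pvL_mem xs indices i).mp hi).2.2⟩)
    hpwL
  unfold pvL at this
  rw [this]
  unfold pvL
  rfl

lemma pvB_char (xs : List String) (indices : List Int) (hnil : indices ≠ []) :
    split_by_indices_alt xs indices =
      pvSegs xs 0 (pvDd ((pvL xs indices).map Int.toNat)) := by
  unfold split_by_indices_alt
  rw [if_neg hnil]
  show (fun st => pvPush st.1 (PySem.Str.join " " st.2))
      ((PySem.List.enumerate xs 0).foldl (pvB_step (pvS xs indices)) ([], [])) = _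
  have hmapmem : ∀ q : Nat, q ∈ (pvL xs indices).map Int.toNat ↔
      (q : Int) ∈ indices ∧ 0 < (q : Int) ∧ (q : Int) ≤ (xs.length : Int) := by
    intro q
    rw [List.mem_map]
    constructor
    · rintro ⟨i, hi, rfl⟩
      have h := (pvL_mem xs indices i).mp hi
      have hieq : ((i.toNat : Int)) = i := by omega
      rw [hieq]
      exact h
    · intro h
      exact ⟨(q : Int), (pvL_mem xs indices (q : Int)).mpr h, by omega⟩
  have heq1 : PySem.List.enumerate xs 0 = PySem.List.enumerate (xs.drop 0) ((0 : Nat) : Int) := by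
    simp
  have heq2 : (([] : List String), ([] : List String)) =
      (([] : List String), pvSeg xs 0 0) := by
    rw [pvSeg_self]
  rw [heq1, heq2]
  refine pvB_loop xs (pvS xs indices) (pvDd ((pvL xs indices).map Int.toNat)) 0 0 []
    (le_refl 0) (Nat.zero_le _) ?_ ?_ ?_
  · -- strictly increasing
    apply pvDd_pairwise
    rw [List.pairwise_map]
    exact List.Pairwise.imp (fun h => Int.toNat_le_toNat h)
      ((PySem.List.sorted_pairwise indices (fun x => x)).filter _)
  · -- bounds
    intro c hc
    have h := (hmapmem c).mp ((pvMem_dd c _).mp hc)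
    exact ⟨Nat.zero_le _, by omega⟩
  · -- the cut set and the cut list agree on positions in range
    intro q _ _
    rw [pvMem_dd, hmapmem q]
    unfold pvS
    rw [PySem.Set.mem_ofList, List.mem_filter]
    simp

theorem split_by_indices_spec : Claim_equal_split_by_indices := by
  intro sentences indices _
  unfold Spec_split_by_indices
  by_cases hnil : indices = []
  · subst hnil
    unfold split_by_indices split_by_indices_alt
    rfl
  · rw [pvA_char sentences indices hnil, pvB_char sentences indices hnil,
      pvSegs_dd sentences ((pvL sentences indices).map Int.toNat) 0]
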